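-- pv_equiv track=rewrite | github.com/Abhinandan-Khurana/PhishSleuth | phish-api/app.py | haveAtSign
-- ===== SOURCE A (Python) =====
-- sc=['@','~','`','!', '$','%','&']
--
-- def haveAtSign(url):
--   flag=0
--   for i in range(len(sc)):
--     if sc[i] in url:
--       at = 1
--       flag=1
--       break
--   if flag==0:
--     at = 0
--   return at
-- ===== SOURCE B (Python) =====
-- SPECIAL = frozenset('@~`!$%&')
--
-- def haveAtSign(url):
--   n = 0
--   for ch in url:
--     if ch in SPECIAL:
--       n += 1
--   return min(n, 1)
-- ===== Notes on version B (the rewrite author's own statement) =====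
-- stated objective: alternative
-- what changed: Inverts the traversal: instead of looping over the special-character list doing a substring scan of url for each (with a flag and break), B makes one counting pass over url's characters against a frozenset and clamps the count with min(n,1).
import Mathlib
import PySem

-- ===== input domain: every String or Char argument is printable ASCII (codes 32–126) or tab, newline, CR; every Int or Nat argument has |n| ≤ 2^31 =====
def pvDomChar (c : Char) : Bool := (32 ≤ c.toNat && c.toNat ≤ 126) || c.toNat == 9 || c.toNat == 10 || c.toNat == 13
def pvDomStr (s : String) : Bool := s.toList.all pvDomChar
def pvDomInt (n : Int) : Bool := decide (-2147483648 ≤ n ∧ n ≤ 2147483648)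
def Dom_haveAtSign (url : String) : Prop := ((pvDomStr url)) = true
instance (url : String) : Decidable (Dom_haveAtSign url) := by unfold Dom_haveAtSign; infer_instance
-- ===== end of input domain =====

-- B inverts the traversal: one counting pass over url's characters against a character set,
-- clamped with min(n,1), instead of A's loop over the special list with substring scans and a break.

-- ===== PORT A =====
-- module constant sc, as in the Python module
def scA : List String := ["@", "~", "`", "!", "$", "%", "&"]

-- the 'for i in range(len(sc))' loop with its break; flag/at collapse to the returned value:
-- break sets at=1 and returns 1, falling through the whole range leaves flag=0 and returns at=0
def haveAtSignLoopA (url : String) : List Int → Int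
  | [] => 0
  | i :: rest =>
      if PySem.Str.isIn (PySem.List.pyGetD scA i "") url then 1
      else haveAtSignLoopA url rest

def haveAtSign (url : String) : Int :=
  haveAtSignLoopA url (PySem.List.pyRange 0 (PySem.List.len scA) 1)

-- ===== PORT B =====
-- SPECIAL = frozenset('@~`!$%&')
def specialB : PySem.Set Char := PySem.Set.ofList ['@', '~', '`', '!', '$', '%', '&']

-- n = 0; for ch in url: if ch in SPECIAL: n += 1; return min(n, 1)
def haveAtSign_alt (url : String) : Int :=
  min (url.toList.foldl (fun n ch => if specialB.contains ch then n + 1 else n) (0 : Int)) 1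

-- ===== PRECONDITION & SPEC =====
def Spec_haveAtSign (url : String) (out : Int) : Prop := out = haveAtSign_alt url
instance (url : String) (out : Int) : Decidable (Spec_haveAtSign url out) := by unfold Spec_haveAtSign; infer_instance

-- ===== CLAIM =====
def Claim_equal_haveAtSign : Prop := ∀ (url : String), Dom_haveAtSign url → Spec_haveAtSign url (haveAtSign url)

-- ===== LEMMAS AND PROOFS =====

theorem toList_ofList (l : List Char) : (String.ofList l).toList = l :=
  (String.ofList_eq.mp rfl).symm

def scChars : List Char := ['@', '~', '`', '!', '$', '%', '&']

theorem isIn_singleton (c : Char) (url : String) :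
    PySem.Str.isIn (String.ofList [c]) url = decide (c ∈ url.toList) := by
  have h : PySem.Str.isIn (String.ofList [c]) url = true ↔ c ∈ url.toList := by
    rw [PySem.Str.isIn_iff_infix, toList_ofList]
    exact List.singleton_infix_iff c url.toList
  by_cases hc : c ∈ url.toList
  · rw [decide_eq_true hc]; exact h.mpr hc
  · rw [decide_eq_false hc, ← Bool.not_eq_true]
    exact fun ht => hc (h.mp ht)

theorem haveAtSign_eq (url : String) :
    haveAtSign url = if ∃ c ∈ scChars, c ∈ url.toList then 1 else 0 := by
  have hr : PySem.List.pyRange 0 (PySem.List.len scA) 1 = [0, 1, 2, 3, 4, 5, 6] := by decide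
  unfold haveAtSign
  rw [hr]
  simp only [haveAtSignLoopA]
  have g0 : PySem.List.pyGetD scA 0 "" = String.ofList ['@'] := rfl
  have g1 : PySem.List.pyGetD scA 1 "" = String.ofList ['~'] := rfl
  have g2 : PySem.List.pyGetD scA 2 "" = String.ofList ['`'] := rfl
  have g3 : PySem.List.pyGetD scA 3 "" = String.ofList ['!'] := rfl
  have g4 : PySem.List.pyGetD scA 4 "" = String.ofList ['$'] := rfl
  have g5 : PySem.List.pyGetD scA 5 "" = String.ofList ['%'] := rfl
  have g6 : PySem.List.pyGetD scA 6 "" = String.ofList ['&'] := rfl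
  rw [g0, g1, g2, g3, g4, g5, g6]
  simp only [isIn_singleton, scChars]
  split_ifs <;> simp_all

theorem special_contains (c : Char) : specialB.contains c = scChars.contains c := rfl

theorem foldl_count (l : List Char) (n : Int) :
    l.foldl (fun n ch => if specialB.contains ch then n + 1 else n) n
      = n + l.countP (fun ch => specialB.contains ch) := by
  induction l generalizing n with
  | nil => simp
  | cons c t ih =>
      simp only [List.foldl_cons, List.countP_cons, ih]
      by_cases h : specialB.contains c = true
      · rw [if_pos h, if_pos h]; push_cast; ring
      · rw [if_neg h, if_neg h]; push_cast; ring

theorem contains_iff (c : Char) : specialB.contains c = true ↔ c ∈ scChars := by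
  rw [special_contains]
  exact List.contains_iff_mem

theorem haveAtSign_alt_eq (url : String) :
    haveAtSign_alt url = if ∃ c ∈ scChars, c ∈ url.toList then 1 else 0 := by
  unfold haveAtSign_alt
  rw [foldl_count, zero_add]
  by_cases h : ∃ c ∈ scChars, c ∈ url.toList
  · rw [if_pos h]
    obtain ⟨c, hc, hcu⟩ := h
    have hne : url.toList.countP (fun ch => specialB.contains ch) ≠ 0 := by
      rw [Ne, List.countP_eq_zero]
      intro hall
      exact hall c hcu ((contains_iff c).mpr hc)
    omega
  · rw [if_neg h]
    have h0 : url.toList.countP (fun ch => specialB.contains ch) = 0 := by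
      rw [List.countP_eq_zero]
      intro c hcu hc
      exact h ⟨c, (contains_iff c).mp hc, hcu⟩
    rw [h0]
    simp

-- ===== VERDICT =====
theorem haveAtSign_spec : Claim_equal_haveAtSign := by
  intro url _
  unfold Spec_haveAtSign
  rw [haveAtSign_eq, haveAtSign_alt_eq]
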